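-- pv_equiv track=rewrite | github.com/chrisgene/snappy | snappy/bin/clean_isogg.py | checkSNPs
-- ===== SOURCE A (Python) =====
-- def checkSNPs(snps):
-- 	nucs = {'A', 'T', 'C', 'G'}
-- 	keep_snps = 1
-- 	if ( len(snps.split('->')) != 2 ):
-- 		return(0)
-- 	a1,a2= snps.split('->')
-- 	for nuc in (a1,a2):
-- 		if not nuc in nucs:
-- 			return(0)
-- 	return keep_snps
-- ===== SOURCE B (Python) =====
-- def checkSNPs(snps):
--     nucs = {'A', 'T', 'C', 'G'}
--     return 1 if (len(snps) == 4 and snps[1:3] == '->' and snps[0] in nucs and snps[3] in nucs) else 0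
-- ===== Notes on version B (the rewrite author's own statement) =====
-- stated objective: simpler
-- what changed: Replaces A's split-on-'->'-then-loop-over-parts decomposition with a single positional whole-string test (length 4, '->' at positions 1-2, nucleotide characters at positions 0 and 3).
import Mathlib
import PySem

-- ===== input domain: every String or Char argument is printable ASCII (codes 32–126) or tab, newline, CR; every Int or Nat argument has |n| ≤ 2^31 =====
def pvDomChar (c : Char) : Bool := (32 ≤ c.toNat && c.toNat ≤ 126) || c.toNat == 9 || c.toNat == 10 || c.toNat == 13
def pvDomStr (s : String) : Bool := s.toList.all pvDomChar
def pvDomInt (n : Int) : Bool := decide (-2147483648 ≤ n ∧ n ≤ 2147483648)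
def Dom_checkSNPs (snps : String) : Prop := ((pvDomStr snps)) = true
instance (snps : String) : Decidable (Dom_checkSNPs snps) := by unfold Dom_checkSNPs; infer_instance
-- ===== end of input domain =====

-- B replaces A's split-into-parts-and-loop with one positional whole-string check (length 4,
-- '->' in the middle, nucleotide characters at both ends); objective: simpler/idiomatic.

-- ===== PORT A =====
-- A over the string's character list (PySem.Str ops are thin wrappers over PySem.Chars)
def checkSNPsL (cs : List Char) : Int :=
  let nucs : PySem.Set (List Char) := PySem.Set.ofList [['A'], ['T'], ['C'], ['G']]
  let keep_snps : Int := 1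
  let parts := PySem.Chars.splitOn cs ['-', '>']   -- snps.split('->'); sep ≠ "" so no ValueError
  if parts.length ≠ 2 then 0
  else
    match parts with                               -- a1, a2 = snps.split('->')
    | [a1, a2] =>
        -- for nuc in (a1, a2): the two-element loop, unrolled
        if PySem.Set.contains nucs a1 = false then 0
        else if PySem.Set.contains nucs a2 = false then 0
        else keep_snps
    | _ => 0                                       -- unreachable: parts.length = 2

def checkSNPs (snps : String) : Int := checkSNPsL snps.toList

-- ===== PORT B =====
def checkSNPs_altL (cs : List Char) : Int :=
  let nucs : PySem.Set Char := PySem.Set.ofList ['A', 'T', 'C', 'G']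
  if (PySem.Chars.len cs == 4
      && PySem.Chars.slice cs (some 1) (some 3) == ['-', '>']
      && (PySem.Chars.pyGet? cs 0).any (fun c => PySem.Set.contains nucs c)
      && (PySem.Chars.pyGet? cs 3).any (fun c => PySem.Set.contains nucs c)) = true
  then 1 else 0

def checkSNPs_alt (snps : String) : Int := checkSNPs_altL snps.toList

-- ===== PRECONDITION & SPEC =====
def Spec_checkSNPs (snps : String) (out : Int) : Prop := out = checkSNPs_alt snps
instance (snps : String) (out : Int) : Decidable (Spec_checkSNPs snps out) := by unfold Spec_checkSNPs; infer_instance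

-- ===== CLAIM (what is proved, stated in full; the proofs are below) =====
def Claim_equal_checkSNPs : Prop := ∀ (snps : String), Dom_checkSNPs snps → Spec_checkSNPs snps (checkSNPs snps)

-- ===== LEMMAS AND PROOFS =====

lemma go_acc (sep : List Char) (fuel : Nat) : ∀ (l cur : List Char) (acc : List (List Char)),
    PySem.Chars.splitOn.go sep fuel l cur acc = acc.reverse ++ PySem.Chars.splitOn.go sep fuel l cur [] := by
  induction fuel with
  | zero => intro l cur acc; simp [PySem.Chars.splitOn.go]
  | succ n ih =>
    intro l cur acc
    cases l with
    | nil => simp [PySem.Chars.splitOn.go]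
    | cons c rest =>
      rw [PySem.Chars.splitOn.go, PySem.Chars.splitOn.go]
      by_cases h : sep.isPrefixOf (c :: rest) = true
      · simp only [h, if_pos]
        rw [ih _ [] (cur.reverse :: acc), ih _ [] [cur.reverse]]
        simp
      · simp only [h, Bool.false_eq_true, if_false]
        exact ih _ _ _

-- proof-only helper: '->'.join of the pieces
def glue (sep : List Char) : List (List Char) → List Char
  | [] => []
  | [x] => x
  | x :: xs => x ++ sep ++ glue sep xs

lemma go_ne_nil (sep : List Char) (fuel : Nat) : ∀ (l cur : List Char) (acc : List (List Char)),
    PySem.Chars.splitOn.go sep fuel l cur acc ≠ [] := by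
  induction fuel with
  | zero => intro l cur acc; simp [PySem.Chars.splitOn.go]
  | succ n ih =>
    intro l cur acc
    cases l with
    | nil => simp [PySem.Chars.splitOn.go]
    | cons c rest =>
      rw [PySem.Chars.splitOn.go]
      by_cases h : sep.isPrefixOf (c :: rest) = true
      · simp only [h, if_pos]; exact ih _ _ _
      · simp only [h, Bool.false_eq_true, if_false]; exact ih _ _ _

lemma go_glue (sep : List Char) (hsep : sep ≠ []) (fuel : Nat) : ∀ (l cur : List Char),
    l.length < fuel → glue sep (PySem.Chars.splitOn.go sep fuel l cur []) = cur.reverse ++ l := by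
  induction fuel with
  | zero => intro l cur h; omega
  | succ n ih =>
    intro l cur h
    cases l with
    | nil => simp [PySem.Chars.splitOn.go, glue]
    | cons c rest =>
      rw [PySem.Chars.splitOn.go]
      by_cases hp : sep.isPrefixOf (c :: rest) = true
      · simp only [hp, if_pos]
        rw [go_acc]
        have hpre : sep <+: (c :: rest) := List.isPrefixOf_iff_prefix.mp hp
        obtain ⟨t, ht⟩ := hpre
        have hlen : 1 ≤ sep.length := List.length_pos_of_ne_nil hsep
        have hdrop : List.drop sep.length (c :: rest) = t := by rw [← ht]; simp
        have hlt : (List.drop sep.length (c :: rest)).length < n := by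
          rw [hdrop]
          have h2 := congrArg List.length ht
          simp only [List.length_append, List.length_cons] at h2 h
          omega
        have hne := go_ne_nil sep n (List.drop sep.length (c :: rest)) [] []
        have hglue : ∀ (x : List Char) (ys : List (List Char)), ys ≠ [] →
            glue sep (x :: ys) = x ++ sep ++ glue sep ys := by
          intro x ys hys
          cases ys with
          | nil => exact absurd rfl hys
          | cons y ys' => cases ys' <;> rfl
        rw [List.reverse_cons, List.reverse_nil, List.nil_append, List.singleton_append]
        rw [hglue _ _ hne, ih _ [] hlt]
        rw [hdrop]
        simp only [List.reverse_nil, List.nil_append, List.append_assoc]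
        rw [ht]
      · simp only [hp, Bool.false_eq_true, if_false]
        rw [ih rest (c :: cur) (by simpa using Nat.lt_of_succ_lt_succ h)]
        simp

lemma splitOn_glue (cs : List Char) :
    glue ['-', '>'] (PySem.Chars.splitOn cs ['-', '>']) = cs := by
  rw [PySem.Chars.splitOn, go_glue ['-', '>'] (by simp) (cs.length + 1) cs [] (by omega)]
  simp

lemma splitOn_quad (a b : Char) :
    PySem.Chars.splitOn [a, '-', '>', b] ['-', '>'] = [[a], [b]] := by
  simp [PySem.Chars.splitOn, PySem.Chars.splitOn.go, List.isPrefixOf]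

lemma shape_of_alt (cs : List Char) (h : checkSNPs_altL cs ≠ 0) :
    ∃ a b, a ∈ (['A', 'T', 'C', 'G'] : List Char) ∧ b ∈ (['A', 'T', 'C', 'G'] : List Char) ∧
      cs = [a, '-', '>', b] := by
  simp only [checkSNPs_altL] at h
  split_ifs at h with hc
  · simp only [Bool.and_eq_true, beq_iff_eq, PySem.Chars.len] at hc
    obtain ⟨⟨⟨hlen, hslice⟩, h0⟩, h3⟩ := hc
    match cs, hlen with
    | [a, b, c, d], _ =>
      refine ⟨a, d, ?_, ?_, ?_⟩
      · simp [PySem.List.pyGet?, PySem.List.pyIdx?, Option.any] at h0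
        simpa [PySem.Set.contains_iff, PySem.Set.mem_ofList] using h0
      · simp [PySem.List.pyGet?, PySem.List.pyIdx?, Option.any] at h3
        simpa [PySem.Set.contains_iff, PySem.Set.mem_ofList] using h3
      · have hs : ([b, c] : List Char) = ['-', '>'] := by
          rw [← hslice]; simp [pysem]
        simp only [List.cons.injEq, and_true] at hs
        rw [hs.1, hs.2]
  · exact absurd rfl h

lemma alt_eq_A (cs : List Char) : checkSNPsL cs = checkSNPs_altL cs := by
  rcases h2 : PySem.Chars.splitOn cs ['-', '>'] with _ | ⟨l1, _ | ⟨l2, _ | ⟨l3, rest⟩⟩⟩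
  case nil =>
    have hA : checkSNPsL cs = 0 := by simp [checkSNPsL, h2]
    rw [hA]
    by_contra h0
    obtain ⟨a, b, _, _, hcs⟩ := shape_of_alt cs (fun h => h0 h.symm)
    rw [hcs, splitOn_quad] at h2
    exact absurd h2 (by simp)
  case cons.nil =>
    have hA : checkSNPsL cs = 0 := by simp [checkSNPsL, h2]
    rw [hA]
    by_contra h0
    obtain ⟨a, b, _, _, hcs⟩ := shape_of_alt cs (fun h => h0 h.symm)
    rw [hcs, splitOn_quad] at h2
    simp at h2
  case cons.cons.cons =>
    have hA : checkSNPsL cs = 0 := by simp [checkSNPsL, h2]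
    rw [hA]
    by_contra h0
    obtain ⟨a, b, _, _, hcs⟩ := shape_of_alt cs (fun h => h0 h.symm)
    rw [hcs, splitOn_quad] at h2
    simp at h2
  case cons.cons.nil =>
    have hcs : cs = l1 ++ '-' :: '>' :: l2 := by
      have := splitOn_glue cs
      rw [h2] at this
      simpa [glue] using this.symm
    by_cases m1 : l1 ∈ ([['A'], ['T'], ['C'], ['G']] : List (List Char))
    · by_cases m2 : l2 ∈ ([['A'], ['T'], ['C'], ['G']] : List (List Char))
      · fin_cases m1 <;> fin_cases m2 <;> subst hcs <;> decide
      · have hc2 : PySem.Set.contains (PySem.Set.ofList [['A'], ['T'], ['C'], ['G']]) l2 = false := by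
          rw [Bool.eq_false_iff]
          intro hc
          exact m2 (by simpa [PySem.Set.mem_ofList] using (PySem.Set.contains_iff _ _).mp hc)
        have hA : checkSNPsL cs = 0 := by
          simp only [checkSNPsL, h2, hc2]
          split_ifs <;> rfl
        rw [hA]
        by_contra h0
        obtain ⟨a, b, ha, hb, hcs2⟩ := shape_of_alt cs (fun h => h0 h.symm)
        rw [hcs2, splitOn_quad] at h2
        simp only [List.cons.injEq, and_true] at h2
        have hl2 : l2 = [b] := h2.2.symm
        subst hl2
        fin_cases hb <;> simp_all
    · have hc1 : PySem.Set.contains (PySem.Set.ofList [['A'], ['T'], ['C'], ['G']]) l1 = false := by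
        rw [Bool.eq_false_iff]
        intro hc
        exact m1 (by simpa [PySem.Set.mem_ofList] using (PySem.Set.contains_iff _ _).mp hc)
      have hA : checkSNPsL cs = 0 := by
        simp only [checkSNPsL, h2, hc1]
        split_ifs <;> rfl
      rw [hA]
      by_contra h0
      obtain ⟨a, b, ha, hb, hcs2⟩ := shape_of_alt cs (fun h => h0 h.symm)
      rw [hcs2, splitOn_quad] at h2
      simp only [List.cons.injEq, and_true] at h2
      have hl1 : l1 = [a] := h2.1.symm
      subst hl1
      fin_cases ha <;> simp_all

-- ===== VERDICT (by name: the statement is the Claim_ definition above) =====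
theorem checkSNPs_spec : Claim_equal_checkSNPs := by
  intro snps _
  exact alt_eq_A snps.toList
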